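-- pv_equiv track=rewrite | github.com/nojan1/AdventOfCode | 2020/06/__init__.py | part1
-- ===== SOURCE A (Python) =====
-- def parse(data):
--     answers = []
--     groups = [answers]
--
--     for l in data.split("\n"):
--         if l == "":
--             answers = []
--             groups.append(answers)
--         else:
--             answers.append(l)
--
--     return groups
--
-- def part1(data):
--     def count_group(answers):
--         unique = set()
--         for a in answers:
--             for x in a:
--                 unique.add(x)
--
--         return len(unique)
--
--
--     groups = parse(data)
--     counts = map(count_group, groups)
--     return sum(counts)
-- ===== SOURCE B (Python) =====
-- def part1(data):
--     total = 0
--     seen = set()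
--     for l in data.split("\n"):
--         if l == "":
--             total += len(seen)
--             seen = set()
--         else:
--             seen |= set(l)
--     return total + len(seen)
-- ===== Notes on version B (the rewrite author's own statement) =====
-- stated objective: simpler
-- what changed: Replaces the two-phase design (stateful parser building a list of groups of lines, then a nested-loop set construction per group and a final sum) with a single pass over the lines keeping only a running total and the current group's character set, unioned per line.
import Mathlib
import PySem

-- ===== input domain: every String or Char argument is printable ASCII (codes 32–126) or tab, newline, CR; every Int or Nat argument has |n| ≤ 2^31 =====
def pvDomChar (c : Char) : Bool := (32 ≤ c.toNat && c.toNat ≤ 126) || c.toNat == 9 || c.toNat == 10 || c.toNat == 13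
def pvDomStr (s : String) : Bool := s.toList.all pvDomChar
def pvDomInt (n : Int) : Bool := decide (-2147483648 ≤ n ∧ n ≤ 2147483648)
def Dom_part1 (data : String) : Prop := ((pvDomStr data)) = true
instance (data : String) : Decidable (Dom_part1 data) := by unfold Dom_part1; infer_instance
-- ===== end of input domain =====

-- B replaces A's parse-into-groups-then-count-and-sum pipeline by one pass over the
-- lines keeping a running total and the current group's character set (objective: simpler).

-- ===== PORT A =====
-- parse: groups is the completed groups plus the current (aliased) answers list
def parseStep (st : List (List (List Char)) × List (List Char)) (l : List Char) :
    List (List (List Char)) × List (List Char) :=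
  if l = [] then (st.1 ++ [st.2], []) else (st.1, st.2 ++ [l])

def parse (data : String) : List (List (List Char)) :=
  let st := (PySem.Chars.splitOn data.toList ['\n']).foldl parseStep ([], [])
  st.1 ++ [st.2]

def countGroup (answers : List (List Char)) : Int :=
  ((answers.foldl (fun u a => a.foldl PySem.Set.add u) (PySem.Set.empty : PySem.Set Char)).length : Int)

def part1 (data : String) : Int :=
  ((parse data).map countGroup).sum

-- ===== PORT B =====
def altStep (st : Int × PySem.Set Char) (l : List Char) : Int × PySem.Set Char :=
  if l = [] then (st.1 + PySem.Set.len st.2, PySem.Set.empty)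
  else (st.1, PySem.Set.update st.2 l)

def part1_alt (data : String) : Int :=
  let st := (PySem.Chars.splitOn data.toList ['\n']).foldl altStep (0, PySem.Set.empty)
  st.1 + PySem.Set.len st.2

-- ===== PRECONDITION & SPEC =====
def Spec_part1 (data : String) (out : Int) : Prop := out = part1_alt data
instance (data : String) (out : Int) : Decidable (Spec_part1 data out) := by unfold Spec_part1; infer_instance

-- ===== CLAIM (what is proved, stated in full; the proofs are below) =====
def Claim_equal_part1 : Prop := ∀ (data : String), Dom_part1 data → Spec_part1 data (part1 data)

-- ===== LEMMAS AND PROOFS =====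

-- the set A's count_group builds for a group
def groupSet (g : List (List Char)) : PySem.Set Char :=
  g.foldl (fun u a => a.foldl PySem.Set.add u) PySem.Set.empty

lemma countGroup_eq (g : List (List Char)) : countGroup g = ((groupSet g).length : Int) := rfl

lemma groupSet_append_singleton (g : List (List Char)) (l : List Char) :
    groupSet (g ++ [l]) = PySem.Set.update (groupSet g) l := by
  simp [groupSet, PySem.Set.update, List.foldl_append]

-- loop invariant: B's fold state mirrors (sum of completed counts, set of current group)
lemma fold_invariant (ls : List (List Char)) (done : List (List (List Char))) (cur : List (List Char)) :
    ls.foldl altStep (((done.map countGroup).sum : Int), groupSet cur) =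
      (((ls.foldl parseStep (done, cur)).1.map countGroup).sum,
        groupSet (ls.foldl parseStep (done, cur)).2) := by
  induction ls generalizing done cur with
  | nil => rfl
  | cons l rest ih =>
    by_cases h : l = []
    · simp only [List.foldl_cons, altStep, parseStep, h, if_true]
      have : ((done.map countGroup).sum : Int) + PySem.Set.len (groupSet cur)
          = (((done ++ [cur]).map countGroup).sum : Int) := by
        simp [PySem.Set.len, countGroup_eq]
      rw [this]
      have hempty : (PySem.Set.empty : PySem.Set Char) = groupSet [] := rfl
      rw [hempty]
      exact ih (done ++ [cur]) []
    · simp only [List.foldl_cons, altStep, parseStep, h, if_false]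
      rw [← groupSet_append_singleton]
      exact ih done (cur ++ [l])

-- ===== VERDICT (by name: the statement is the Claim_ definition above) =====
theorem part1_spec : Claim_equal_part1 := by
  intro data _
  show part1 data = part1_alt data
  unfold part1 part1_alt parse
  have h := fold_invariant (PySem.Chars.splitOn data.toList ['\n']) [] []
  simp only [List.map_nil, List.sum_nil] at h
  have hg : groupSet [] = (PySem.Set.empty : PySem.Set Char) := rfl
  rw [hg] at h
  rw [h]
  simp [countGroup_eq, PySem.Set.len]
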